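-- pv_equiv track=rewrite | github.com/pypi-data/pypi-mirror-333 | packages/pn-sequence/pn_sequence-0.1.0.tar.gz/pn_sequence-0.1.0/src/pn_sequence/__init__.py | is_third_postulate_true
-- ===== SOURCE A (Python) =====
-- def is_third_postulate_true(sequence):
--     """Tests whether the sequence satisfies the second postulate
--
--     The autocorrelation function C(t) is two-valued.
--     (Menezes, Van Oorschot and Vanstone, 2018)
--
--     Args:
--         sequence: A string with a binary sequence to be tested.
--     Returns:
--         bool: Whether the sequence satisfies the second postulate
--     """
--     sequence2 = sequence[1:] + sequence[:1]
--     hamm_dist = _hamming_distance(sequence, sequence2)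
--
--     for i in range(2, len(sequence) - 1):
--         sequence2 = sequence[i:] + sequence[:i]
--         if hamm_dist != _hamming_distance(sequence, sequence2):
--             return False
--
--     return True
--
-- def _hamming_distance(s1, s2):
--     distance = 0
--     for i, j in zip(s1, s2):
--         if i != j:
--             distance += 1
--
--     return distance
-- ===== SOURCE B (Python) =====
-- def is_third_postulate_true(sequence):
--     """Same test as A (cyclic-shift Hamming distance equal for every shift
--     2..len-2 to that of shift 1), but instead of building a rotated copy of the
--     string and scanning it character by character for each shift, index the
--     positions of each symbol once into sets; the number of positions a cyclic
--     shift by t leaves on the same symbol is the match count, and the shift-t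
--     Hamming distance is n minus it."""
--     n = len(sequence)
--     if n < 2:
--         return True
--     pos = {}
--     for j, ch in enumerate(sequence):
--         pos.setdefault(ch, set()).add(j)
--     def matches(t):
--         return sum(1 for S in pos.values() for p in S if (p + t) % n in S)
--     d1 = n - matches(1)
--     return all(n - matches(t) == d1 for t in range(2, n - 1))
-- ===== Notes on version B (the rewrite author's own statement) =====
-- stated objective: alternative
-- what changed: B indexes the positions of each symbol once into per-symbol sets and obtains each shift-t Hamming distance as n minus the number of positions the cyclic shift by t keeps on the same symbol (a set-membership count), instead of A's per-shift construction of a rotated string and character-by-character Hamming scan.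
import Mathlib
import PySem

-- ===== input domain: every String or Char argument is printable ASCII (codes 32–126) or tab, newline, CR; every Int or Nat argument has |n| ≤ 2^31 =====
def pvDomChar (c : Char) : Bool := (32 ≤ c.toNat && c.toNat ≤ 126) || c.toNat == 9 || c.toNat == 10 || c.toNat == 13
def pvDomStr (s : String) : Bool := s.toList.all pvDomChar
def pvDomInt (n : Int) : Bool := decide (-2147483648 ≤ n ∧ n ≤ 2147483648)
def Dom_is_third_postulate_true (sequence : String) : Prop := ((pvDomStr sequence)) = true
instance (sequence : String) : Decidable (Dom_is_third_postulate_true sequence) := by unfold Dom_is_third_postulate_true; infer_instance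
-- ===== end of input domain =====

-- B replaces A's per-shift rotated-copy Hamming scan by a per-symbol position index and
-- set-membership match counts (objective: alternative; same worst-case cost).

-- ===== PORT A =====
-- _hamming_distance s1 s2
def pvHamming (s1 s2 : List Char) : Int :=
  (s1.zip s2).foldl (fun d ij => if ij.1 ≠ ij.2 then d + 1 else d) 0

-- sequence[i:] + sequence[:i]
def pvRot (l : List Char) (i : Int) : List Char :=
  PySem.List.slice l (some i) none ++ PySem.List.slice l none (some i)

-- the 'for i in range(2, len(sequence) - 1)' loop with its early return
def pvLoopA (l : List Char) (h : Int) : List Int → Bool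
  | [] => true
  | i :: rest => if h ≠ pvHamming l (pvRot l i) then false else pvLoopA l h rest

def is_third_postulate_true (sequence : String) : Bool :=
  let l := sequence.toList
  let hamm_dist := pvHamming l (pvRot l 1)
  pvLoopA l hamm_dist (PySem.List.pyRange 2 ((l.length : Int) - 1) 1)

-- ===== PORT B =====
-- pos = {}; for j, ch in enumerate(sequence): pos.setdefault(ch, set()).add(j)
def pvGroup (l : List Char) : PySem.Dict Char (PySem.Set Int) :=
  (PySem.List.enumerate l).foldl
    (fun d ji => d.modify ji.2 PySem.Set.empty (fun S => PySem.Set.add S ji.1))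
    PySem.Dict.empty

-- matches(t) = sum(1 for S in pos.values() for p in S if (p + t) % n in S)
def pvMatches (pos : PySem.Dict Char (PySem.Set Int)) (n t : Int) : Int :=
  pos.values.foldl
    (fun acc S =>
      acc + S.foldl (fun a p => if PySem.Set.contains S (PySem.Int.mod (p + t) n) then a + 1 else a) 0)
    0

def is_third_postulate_true_alt (sequence : String) : Bool :=
  let l := sequence.toList
  let n : Int := l.length
  if n < 2 then true
  else
    let pos := pvGroup l
    let d1 := n - pvMatches pos n 1
    (PySem.List.pyRange 2 (n - 1) 1).all (fun t => n - pvMatches pos n t == d1)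

-- ===== PRECONDITION & SPEC =====
def Spec_is_third_postulate_true (sequence : String) (out : Bool) : Prop := out = is_third_postulate_true_alt sequence
instance (sequence : String) (out : Bool) : Decidable (Spec_is_third_postulate_true sequence out) := by unfold Spec_is_third_postulate_true; infer_instance

-- ===== CLAIM (what is proved, stated in full; the proofs are below) =====
def Claim_equal_is_third_postulate_true : Prop := ∀ (sequence : String), Dom_is_third_postulate_true sequence → Spec_is_third_postulate_true sequence (is_third_postulate_true sequence)

-- ===== LEMMAS AND PROOFS =====

-- positions (as Ints) of character c in l, in order of occurrence
def pvPosOf (l : List Char) (c : Char) : List Int :=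
  ((PySem.List.enumerate l).filter (fun ji => ji.2 == c)).map (·.1)

-- number of indices j at which l agrees with its cyclic shift by k
def pvMatchCnt (l : List Char) (k : Nat) : Nat :=
  (List.range l.length).countP (fun j => l.getD ((j + k) % l.length) ' ' == l.getD j ' ')

lemma enum_eq (l : List Char) : PySem.List.enumerate l = (List.range l.length).map (fun (j : Nat) => ((j:Int), l.getD j ' ')) := by
  rw [PySem.List.enumerate_eq_map_pyRange l ' ']
  rw [show PySem.List.len l = (l.length : Int) from PySem.List.len_eq l]
  rw [PySem.List.pyRange_zero_nat, List.map_map]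
  apply List.map_congr_left
  intro j hj
  simp [Function.comp]

lemma posOf_eq (l : List Char) (c : Char) :
    pvPosOf l c
      = ((List.range l.length).filter (fun j => l.getD j ' ' == c)).map (fun (j:Nat) => (j : Int)) := by
  unfold pvPosOf
  rw [enum_eq, List.filter_map, List.map_map]
  simp [Function.comp_def]

lemma loopA_eq_all (l : List Char) (h : Int) (L : List Int) :
    pvLoopA l h L = L.all (fun i => h == pvHamming l (pvRot l i)) := by
  induction L with
  | nil => rfl
  | cons i rest ih =>
    simp only [pvLoopA, List.all_cons, ih]
    by_cases hx : h = pvHamming l (pvRot l i) <;> simp [hx]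

lemma zipRot (l : List Char) (k : Nat) (hk : k ≤ l.length) :
    l.zip (pvRot l (k : Int))
      = (List.range l.length).map (fun (j:Nat) => (l.getD j ' ', l.getD ((j + k) % l.length) ' ')) := by
  have hrot : pvRot l (k : Int) = l.drop k ++ l.take k := by
    simp [pvRot, PySem.List.slice_from_natCast, PySem.List.slice_to_natCast]
  apply List.ext_getElem
  · simp [hrot, List.length_zip]; omega
  · intro j h1 h2
    have hj : j < l.length := by simp [hrot, List.length_zip] at h1; omega
    have hn : 0 < l.length := by omega
    simp only [hrot, List.getElem_zip, List.getElem_map, List.getElem_range]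
    have hmlt : (j + k) % l.length < l.length := Nat.mod_lt _ hn
    rw [List.getD_eq_getElem l ' ' hj, List.getD_eq_getElem l ' ' hmlt]
    refine Prod.ext rfl ?_
    by_cases hcase : j < l.length - k
    · have h5 : j + k < l.length := by omega
      rw [List.getElem_append_left (by simpa using hcase)]
      have hE : (j + k) % l.length = k + j := by rw [Nat.mod_eq_of_lt h5]; omega
      simp only [hE, List.getElem_drop]
    · have h6 : j + k - l.length < l.length := by omega
      rw [List.getElem_append_right (by simpa using hcase)]
      have hE : (j + k) % l.length = j - (l.drop k).length := by
        rw [Nat.mod_eq_sub_mod (by omega), Nat.mod_eq_of_lt h6]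
        simp
        omega
      simp only [hE, List.getElem_take]

lemma hamming_eq (l : List Char) (k : Nat) (hk : k ≤ l.length) :
    pvHamming l (pvRot l (k : Int)) = (l.length : Int) - (pvMatchCnt l k : Int) := by
  unfold pvHamming
  rw [zipRot l k hk]
  rw [PySem.List.foldl_ite_add_one]
  rw [List.countP_map]
  have : ((List.range l.length).countP
      ((fun ij => decide (ij.1 ≠ ij.2)) ∘ (fun (j:Nat) => (l.getD j ' ', l.getD ((j + k) % l.length) ' '))))
      = l.length - pvMatchCnt l k := by
    have hsplit := List.length_eq_countP_add_countP
      (p := fun (j:Nat) => l.getD ((j + k) % l.length) ' ' == l.getD j ' ') (l := List.range l.length)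
    have hcong : ((List.range l.length).countP
        ((fun ij => decide (ij.1 ≠ ij.2)) ∘ (fun (j:Nat) => (l.getD j ' ', l.getD ((j + k) % l.length) ' '))))
        = (List.range l.length).countP
            (fun (j:Nat) => decide ¬((fun (j:Nat) => l.getD ((j + k) % l.length) ' ' == l.getD j ' ') j = true)) := by
      apply List.countP_congr
      intro j hj
      simp only [Function.comp, decide_not, Bool.not_eq_true', beq_iff_eq, ne_eq,
        decide_eq_false_iff_not]
      exact not_congr eq_comm
    rw [hcong]
    beta_reduce
    simp only [List.length_range] at hsplit
    simp only [pvMatchCnt]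
    omega
  rw [this]
  have hle : pvMatchCnt l k ≤ l.length := by
    have := List.countP_le_length (l := List.range l.length) (p := fun j => l.getD ((j + k) % l.length) ' ' == l.getD j ' ')
    simpa [pvMatchCnt] using this
  push_cast [Nat.cast_sub hle]
  ring
lemma grp_aux (L : List (Int × Char)) :
    ∀ (d : PySem.Dict Char (PySem.Set Int)),
    (L.map (·.1)).Nodup →
    (∀ (c : Char) (p : Int × Char), p ∈ L → p.1 ∉ d.getD c PySem.Set.empty) →
    ∀ c, (L.foldl (fun d ji => d.modify ji.2 PySem.Set.empty (fun S => PySem.Set.add S ji.1)) d).getD c PySem.Set.empty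
        = d.getD c PySem.Set.empty ++ (L.filter (fun ji => ji.2 == c)).map (·.1) := by
  induction L with
  | nil => intro d _ _ c; simp
  | cons x L ih =>
    intro d hnd hfresh c
    simp only [List.foldl_cons]
    set d' := d.modify x.2 PySem.Set.empty (fun S => PySem.Set.add S x.1) with hd'
    have hgetD' : ∀ c', d'.getD c' PySem.Set.empty
        = if c' = x.2 then PySem.Set.add (d.getD x.2 PySem.Set.empty) x.1 else d.getD c' PySem.Set.empty := by
      intro c'; rw [hd', PySem.Dict.getD_modify]
    rw [List.map_cons] at hnd
    have hnd2 := List.nodup_cons.mp hnd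
    have hnd' : (L.map (·.1)).Nodup := hnd2.2
    have hx1L : ∀ p ∈ L, p.1 ≠ x.1 := by
      intro p hp heq
      exact hnd2.1 (heq ▸ List.mem_map_of_mem hp)
    have hfresh' : ∀ (c' : Char) (p : Int × Char), p ∈ L → p.1 ∉ d'.getD c' PySem.Set.empty := by
      intro c' p hp
      rw [hgetD']
      by_cases hc : c' = x.2
      · subst hc
        rw [if_pos rfl, PySem.Set.mem_add]
        rintro (h | h)
        · exact hfresh _ p (by simp [hp]) h
        · exact hx1L p hp h
      · simp only [if_neg hc]
        exact hfresh _ p (by simp [hp])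
    rw [ih d' hnd' hfresh' c, hgetD']
    by_cases hc : c = x.2
    · have hadd : PySem.Set.add (d.getD x.2 PySem.Set.empty) x.1 = d.getD x.2 PySem.Set.empty ++ [x.1] :=
        PySem.Set.add_of_not_mem (hfresh x.2 x (by simp))
      subst hc
      rw [if_pos rfl, hadd, List.filter_cons]
      simp [List.append_assoc]
    · have : (x.2 == c) = false := by simp [Ne.symm hc]  -- hmm direction
      simp [if_neg hc, this]

lemma pvGroup_getD (l : List Char) (c : Char) :
    (pvGroup l).getD c PySem.Set.empty = pvPosOf l c := by
  unfold pvGroup pvPosOf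
  rw [grp_aux (PySem.List.enumerate l) PySem.Dict.empty ?hnd ?hfresh c]
  · simp [PySem.Dict.getD_empty]
  case hnd =>
    rw [show ((PySem.List.enumerate l).map (·.1)) = PySem.List.pyRange 0 (0 + l.length) 1 from
      PySem.List.map_fst_enumerate l 0]
    exact PySem.List.nodup_pyRange_one 0 _
  case hfresh =>
    intro c' p hp
    simp [PySem.Dict.getD_empty, PySem.Set.empty]

lemma pvGroup_keys_nodup (l : List Char) : (pvGroup l).keys.Nodup := by
  unfold pvGroup
  exact PySem.Dict.nodup_keys_foldl_modify_key _ _ _ _ _ PySem.Dict.nodup_keys_empty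

lemma pvGroup_keys (l : List Char) : (pvGroup l).keys = PySem.Set.ofList l := by
  unfold pvGroup
  rw [PySem.Dict.keys_foldl_modify_key]
  simp [PySem.Dict.keys_empty, PySem.List.map_snd_enumerate, PySem.Set.update_nil_left]

lemma pvGroup_values (l : List Char) :
    (pvGroup l).values = (PySem.Set.ofList l).map (pvPosOf l) := by
  rw [PySem.Dict.values_eq_map_keys _ (pvGroup_keys_nodup l) PySem.Set.empty, pvGroup_keys]
  exact List.map_congr_left (fun c _ => pvGroup_getD l c)

lemma sum_ite_single (K : List Char) (hK : K.Nodup) (a b : Char) :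
    (K.map (fun c => if (b == c) && (a == c) then (1:Int) else 0)).sum
      = if b = a ∧ a ∈ K then 1 else 0 := by
  rw [PySem.List.sum_map_ite_one_zero]
  by_cases hba : b = a
  · subst hba
    have h1 : K.countP (fun c => (b == c) && (b == c)) = K.count b := by
      rw [List.count_eq_countP]
      apply List.countP_congr
      intro c _
      rw [Bool.and_self]
      simp only [beq_iff_eq]
      exact eq_comm
    rw [h1]
    by_cases hm : b ∈ K
    · have hle : K.count b ≤ 1 := List.nodup_iff_count_le_one.mp hK b
      have hge : 0 < K.count b := List.count_pos_iff.mpr hm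
      rw [if_pos ⟨rfl, hm⟩]
      have : K.count b = 1 := by omega
      rw [this]; rfl
    · rw [List.count_eq_zero_of_not_mem hm]
      simp [hm]
  · have h0 : K.countP (fun c => (b == c) && (a == c)) = 0 := by
      rw [List.countP_eq_zero]
      intro c _
      simp only [Bool.and_eq_true, beq_iff_eq]
      rintro ⟨rfl, rfl⟩
      exact hba rfl
    rw [h0]
    simp [hba]

lemma pvSwap (f g : Nat → Char) (K : List Char) (hK : K.Nodup) (J : List Nat) :
    (K.map (fun c => ((J.countP (fun j => (g j == c) && (f j == c))) : Int))).sum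
      = ((J.countP (fun j => (g j == f j) && decide (f j ∈ K))) : Int) := by
  induction J with
  | nil => simp
  | cons j J ih =>
    have hmapeq : (K.map (fun c => (((j :: J).countP (fun j => (g j == c) && (f j == c))) : Int)))
        = K.map (fun c => ((J.countP (fun j => (g j == c) && (f j == c))) : Int)
            + (if (g j == c) && (f j == c) then (1:Int) else 0)) := by
      apply List.map_congr_left
      intro c _
      rw [List.countP_cons]
      push_cast
      by_cases h : ((g j == c) && (f j == c)) = true <;> simp [h]
    rw [hmapeq, PySem.List.sum_map_add_int, ih, sum_ite_single K hK (f j) (g j)]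
    rw [List.countP_cons]
    push_cast
    by_cases h : g j = f j ∧ f j ∈ K
    · rw [if_pos h]
      have : ((g j == f j) && decide (f j ∈ K)) = true := by simp [h.1, h.2]
      simp [this]
    · rw [if_neg h]
      have : ((g j == f j) && decide (f j ∈ K)) = false := by
        simp only [Bool.and_eq_false_iff]
        by_cases h1 : g j = f j
        · right
          simp only [decide_eq_false_iff_not]
          exact fun hm => h ⟨h1, hm⟩
        · left; simp [h1]
      simp [this]

lemma mem_pvPosOf (l : List Char) (c : Char) (x : Int) :
    x ∈ pvPosOf l c ↔ ∃ j : Nat, j < l.length ∧ x = (j : Int) ∧ l.getD j ' ' = c := by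
  rw [posOf_eq]
  simp only [List.mem_map, List.mem_filter, List.mem_range, beq_iff_eq]
  constructor
  · rintro ⟨j, ⟨hj, hc⟩, rfl⟩
    exact ⟨j, hj, rfl, hc⟩
  · rintro ⟨j, hj, rfl, hc⟩
    exact ⟨j, ⟨hj, hc⟩, rfl⟩

lemma pvClassCount (l : List Char) (c : Char) (k : Nat) (hk : k < l.length) :
    (pvPosOf l c).countP
        (fun p => PySem.Set.contains (pvPosOf l c) (PySem.Int.mod (p + (k : Int)) (l.length : Int)))
      = (List.range l.length).countP
          (fun j => (l.getD ((j + k) % l.length) ' ' == c) && (l.getD j ' ' == c)) := by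
  have hn : 0 < l.length := by omega
  have hcontains : ∀ m : Nat, m < l.length →
      PySem.Set.contains (pvPosOf l c) ((m : Int)) = (l.getD m ' ' == c) := by
    intro m hm
    by_cases hmc : l.getD m ' ' = c
    · have : ((m : Int)) ∈ pvPosOf l c := (mem_pvPosOf l c _).mpr ⟨m, hm, rfl, hmc⟩
      rw [(PySem.Set.contains_iff _ _).mpr this]
      exact (beq_iff_eq.mpr hmc).symm
    · have hnm : ((m : Int)) ∉ pvPosOf l c := by
        rw [mem_pvPosOf]
        rintro ⟨j, hj, hje, hjc⟩
        have : j = m := by exact_mod_cast hje.symm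
        exact hmc (this ▸ hjc)
      have : PySem.Set.contains (pvPosOf l c) ((m : Int)) ≠ true :=
        fun h => hnm ((PySem.Set.contains_iff _ _).mp h)
      simp only [Bool.not_eq_true] at this
      rw [this]
      exact (beq_eq_false_iff_ne.mpr hmc).symm
  conv_lhs => rw [posOf_eq]
  rw [List.countP_map, List.countP_filter]
  apply List.countP_congr
  intro j hj
  have hjn : j < l.length := List.mem_range.mp hj
  have hcast : ((j : Int) + (k : Int)) = (((j + k : Nat)) : Int) := by push_cast; ring
  have hmod : PySem.Int.mod ((j : Int) + (k : Int)) ((l.length : Int))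
      = (((j + k) % l.length : Nat) : Int) := by
    rw [hcast]
    exact PySem.Int.mod_natCast _ _
  simp only [Function.comp_def, hmod]
  rw [← posOf_eq, hcontains _ (Nat.mod_lt _ hn)]

lemma pvMatches_eq (l : List Char) (k : Nat) (hk : k < l.length) :
    pvMatches (pvGroup l) (l.length : Int) (k : Int) = (pvMatchCnt l k : Int) := by
  unfold pvMatches
  rw [pvGroup_values, List.foldl_map]
  rw [PySem.List.foldl_add (g := fun c => (pvPosOf l c).foldl
      (fun a p => if PySem.Set.contains (pvPosOf l c) (PySem.Int.mod (p + (k:Int)) ((l.length:Int))) then a + 1 else a) 0)]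
  have hinner : ∀ c, (pvPosOf l c).foldl
      (fun a p => if PySem.Set.contains (pvPosOf l c) (PySem.Int.mod (p + (k:Int)) ((l.length:Int))) then a + 1 else a) 0
      = (((List.range l.length).countP
          (fun j => (l.getD ((j + k) % l.length) ' ' == c) && (l.getD j ' ' == c))) : Int) := by
    intro c
    rw [PySem.List.foldl_if_add_one]
    rw [pvClassCount l c k hk]
    ring
  have hmapeq : (PySem.Set.ofList l).map (fun c => (pvPosOf l c).foldl
      (fun a p => if PySem.Set.contains (pvPosOf l c) (PySem.Int.mod (p + (k:Int)) ((l.length:Int))) then a + 1 else a) 0)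
      = (PySem.Set.ofList l).map (fun c => (((List.range l.length).countP
          (fun j => (l.getD ((j + k) % l.length) ' ' == c) && (l.getD j ' ' == c))) : Int)) :=
    List.map_congr_left (fun c _ => hinner c)
  rw [hmapeq]
  rw [pvSwap (fun j => l.getD j ' ') (fun j => l.getD ((j + k) % l.length) ' ')
      (PySem.Set.ofList l) (PySem.Set.nodup_ofList l) (List.range l.length)]
  have hfinal : (List.range l.length).countP
      (fun j => (l.getD ((j + k) % l.length) ' ' == l.getD j ' ') && decide (l.getD j ' ' ∈ PySem.Set.ofList l))
      = pvMatchCnt l k := by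
    apply List.countP_congr
    intro j hj
    have hjn : j < l.length := List.mem_range.mp hj
    have hmem : l.getD j ' ' ∈ l := by
      rw [List.getD_eq_getElem l ' ' hjn]
      exact List.getElem_mem hjn
    simp
    intro _
    simpa using hmem
  rw [hfinal]
  ring

lemma all_congr_mem (L : List Int) (f g : Int → Bool) (h : ∀ x ∈ L, f x = g x) :
    L.all f = L.all g := by
  induction L with
  | nil => rfl
  | cons x L ih =>
    simp only [List.all_cons]
    rw [h x (by simp), ih (fun y hy => h y (by simp [hy]))]

-- ===== VERDICT (by name: the statement is the Claim_ definition above) =====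
theorem is_third_postulate_true_spec : Claim_equal_is_third_postulate_true := by
  unfold Claim_equal_is_third_postulate_true Spec_is_third_postulate_true
  intro s _
  unfold is_third_postulate_true is_third_postulate_true_alt
  dsimp only
  set l := s.toList with hl
  by_cases hn2 : l.length < 2
  · have hempty : PySem.List.pyRange 2 ((l.length : Int) - 1) 1 = [] :=
      PySem.List.pyRange_one_eq_nil (by omega)
    rw [hempty]
    simp only [pvLoopA]
    rw [if_pos (by exact_mod_cast hn2 : ((l.length:Int) < 2))]
  · rw [if_neg (by omega : ¬ ((l.length:Int) < 2))]
    rw [loopA_eq_all]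
    apply all_congr_mem
    intro t ht
    rw [PySem.List.mem_pyRange_one] at ht
    have ht2 : (2:Int) ≤ t := ht.1
    have htn : t < (l.length : Int) - 1 := ht.2
    have htnat : t = ((t.toNat : Nat) : Int) := by omega
    set k := t.toNat with hkdef
    have hk1 : 2 ≤ k := by omega
    have hkn : k < l.length := by omega
    rw [htnat]
    rw [hamming_eq l k (le_of_lt hkn)]
    rw [show (1:Int) = ((1:Nat):Int) from rfl]
    rw [hamming_eq l 1 (by omega)]
    rw [pvMatches_eq l k hkn, pvMatches_eq l 1 (by omega)]
    exact Bool.beq_comm
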